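-- pv_equiv track=rewrite | github.com/stone2324/coding_challenges | 07_barrel_warehouse.py | insert_barrels
-- ===== SOURCE A (Python) =====
-- def insert_barrels(inventory, barrels):
--     is_empty_length = 0
--     for index, item in enumerate(inventory):
--         if item == "":
--             if is_empty_length == 0:
--                 is_empty_index = index
--             is_empty_length += 1
--             if len(barrels) == is_empty_length:
--                 inventory[is_empty_index:is_empty_index+len(barrels)] = ['0'] * len(barrels)
--                 break
--         else:
--             is_empty_length = 0
--     return inventory
-- ===== SOURCE B (Python) =====
-- def insert_barrels(inventory, barrels):
--     # window scan: find the first start i whose k-slot window is entirely empty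
--     k = len(barrels)
--     n = len(inventory)
--     i = 0
--     while i + k <= n:
--         if all(slot == "" for slot in inventory[i:i+k]):
--             inventory[i:i+k] = ['0'] * k
--             return inventory
--         i += 1
--     return inventory
-- ===== Notes on version B (the rewrite author's own statement) =====
-- stated objective: simpler
-- what changed: Replaces the running-counter run accumulator over enumerate with a scan over candidate start positions testing whole windows for emptiness.
import Mathlib
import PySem

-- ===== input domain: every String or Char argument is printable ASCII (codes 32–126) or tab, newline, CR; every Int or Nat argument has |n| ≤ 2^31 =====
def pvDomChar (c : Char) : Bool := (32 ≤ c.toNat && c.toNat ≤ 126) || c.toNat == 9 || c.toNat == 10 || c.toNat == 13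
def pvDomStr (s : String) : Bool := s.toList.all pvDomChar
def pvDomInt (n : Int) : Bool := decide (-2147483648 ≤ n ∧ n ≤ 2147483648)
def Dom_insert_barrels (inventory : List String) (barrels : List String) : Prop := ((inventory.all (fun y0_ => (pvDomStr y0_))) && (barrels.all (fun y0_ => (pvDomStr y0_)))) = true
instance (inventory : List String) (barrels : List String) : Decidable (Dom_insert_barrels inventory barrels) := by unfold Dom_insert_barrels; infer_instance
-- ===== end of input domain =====

-- B replaces A's running-counter accumulator with a window scan over start positions (simpler);
-- both Pythons mutate `inventory` identically on success — the equivalence proved here is about the return value.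

-- ===== PORT A =====
-- A's for-loop over enumerate(inventory): structural recursion over the remaining items,
-- carrying the current index i (enumerate yields successive indices 0,1,2,… — exact),
-- the run length `len` and the run start `idx` (is_empty_index; 0 before its first assignment,
-- matching Python where it is only read after having been set).
-- The slice assignment inventory[idx:idx+k] = ['0']*k (here 0 ≤ idx, idx+k ≤ length, so it is
-- exactly take/replicate/drop) followed by `break`/`return inventory`.
def insert_barrelsGo (inv : List String) (k : Nat) (rest : List String) (i len idx : Nat) : List String :=
  match rest with
  | [] => inv
  | item :: rest =>
    if item == "" then
      let idx' := if len == 0 then i else idx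
      if k == len + 1 then
        inv.take idx' ++ List.replicate k "0" ++ inv.drop (idx' + k)
      else
        insert_barrelsGo inv k rest (i+1) (len+1) idx'
    else
      insert_barrelsGo inv k rest (i+1) 0 idx

def insert_barrels (inventory : List String) (barrels : List String) : List String :=
  insert_barrelsGo inventory barrels.length inventory 0 0 0

-- ===== PORT B =====
-- Source B's while loop: scan start positions i while i+k ≤ n; inventory[i:i+k] with
-- 0 ≤ i and i+k ≤ n is exactly (drop i).take k, and the slice assignment on success
-- is exactly take/replicate/drop.
def insert_barrelsAltGo (inv : List String) (k : Nat) (i : Nat) : List String :=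
  if h : i + k ≤ inv.length then
    if ((inv.drop i).take k).all (fun slot => slot == "") then
      inv.take i ++ List.replicate k "0" ++ inv.drop (i + k)
    else
      insert_barrelsAltGo inv k (i+1)
  else inv
termination_by inv.length + 1 - i
decreasing_by omega

def insert_barrels_alt (inventory : List String) (barrels : List String) : List String :=
  insert_barrelsAltGo inventory barrels.length 0

-- ===== PRECONDITION & SPEC =====
def Spec_insert_barrels (inventory : List String) (barrels : List String) (out : List String) : Prop := out = insert_barrels_alt inventory barrels
instance (inventory : List String) (barrels : List String) (out : List String) : Decidable (Spec_insert_barrels inventory barrels out) := by unfold Spec_insert_barrels; infer_instance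

-- ===== CLAIM (what is proved, stated in full; the proofs are below) =====
def Claim_equal_insert_barrels : Prop := ∀ (inventory : List String) (barrels : List String), Dom_insert_barrels inventory barrels → Spec_insert_barrels inventory barrels (insert_barrels inventory barrels)

-- ===== LEMMAS AND PROOFS =====

-- With k = 0, A's trigger `k == len+1` never fires: A returns inv.
lemma aGo_zero (inv : List String) (rest : List String) (i len idx : Nat) :
    insert_barrelsGo inv 0 rest i len idx = inv := by
  induction rest generalizing i len idx with
  | nil => rfl
  | cons item rest ih =>
      simp only [insert_barrelsGo]
      split <;> simp [ih]

-- One failing (or out-of-range) step of B's scan: if the window at s covers a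
-- nonempty in-range slot, B moves on to s+1.
lemma bGo_step (inv : List String) (k s i : Nat) (hi : i < inv.length)
    (hsi : s ≤ i) (hik : i < s + k) (hne : inv[i]'hi ≠ "") :
    insert_barrelsAltGo inv k s = insert_barrelsAltGo inv k (s+1) := by
  rw [insert_barrelsAltGo]
  split
  · rename_i h
    have hall : ((inv.drop s).take k).all (fun slot => slot == "") = false := by
      rw [List.all_eq_false]
      refine ⟨inv[i]'hi, ?_, by simp [hne]⟩
      have hj : i - s < ((inv.drop s).take k).length := by
        simp only [List.length_take, List.length_drop]
        omega
      have : ((inv.drop s).take k)[i - s]'hj = inv[i]'hi := by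
        rw [List.getElem_take, List.getElem_drop]
        congr 1
        omega
      exact this ▸ List.getElem_mem hj
    simp [hall]
  · rename_i h
    rw [insert_barrelsAltGo]
    have : ¬ (s + 1 + k ≤ inv.length) := by omega
    simp [this]

-- Iterated bGo_step: a nonempty slot at i kills every window start in [i-len, i].
lemma bGo_skip (inv : List String) (k : Nat) (i : Nat) (len : Nat) (hi : i < inv.length)
    (hlk : len < k) (hle : len ≤ i) (hne : inv[i]'hi ≠ "") :
    insert_barrelsAltGo inv k (i - len) = insert_barrelsAltGo inv k (i+1) := by
  induction len with
  | zero => simpa using bGo_step inv k i i hi le_rfl (by omega) hne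
  | succ m ih =>
      have h1 : insert_barrelsAltGo inv k (i - (m+1)) = insert_barrelsAltGo inv k (i - m) := by
        have := bGo_step inv k (i - (m+1)) i hi (by omega) (by omega) hne
        have heq : i - (m+1) + 1 = i - m := by omega
        rwa [heq] at this
      rw [h1, ih (by omega) (by omega)]

-- Main invariant: when A is processing inventory from position i with a current run of
-- `len` empties ending just before i (run start i - len), A's remaining loop computes
-- the same result as B's scan restarted at the run start.
lemma main_inv (inv : List String) (k : Nat) (hk : 0 < k) :
    ∀ (rest : List String) (i len idx : Nat),
      rest = inv.drop i → i ≤ inv.length → len ≤ i → len < k →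
      (len ≠ 0 → idx = i - len) →
      (∀ j (hj : j < inv.length), i - len ≤ j → j < i → inv[j]'hj = "") →
      insert_barrelsGo inv k rest i len idx = insert_barrelsAltGo inv k (i - len) := by
  intro rest
  induction rest with
  | nil =>
      intro i len idx hrest hi hlen hlk hidx hemp
      have hil : i = inv.length := by
        have := congrArg List.length hrest
        simp [List.length_drop] at this
        omega
      rw [insert_barrelsGo, insert_barrelsAltGo]
      have : ¬ (i - len + k ≤ inv.length) := by omega
      simp [this]
  | cons item rest ih =>
      intro i len idx hrest hi hlen hlk hidx hemp
      have hilt : i < inv.length := by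
        have := congrArg List.length hrest
        simp [List.length_drop] at this
        omega
      have hitem : item = inv[i]'hilt := by
        have h0 := congrArg (fun l => l[0]?) hrest
        simp [List.getElem?_drop, List.getElem?_eq_getElem hilt] at h0
        exact h0
      have hrest' : rest = inv.drop (i+1) := by
        have := congrArg List.tail hrest
        simpa [List.tail_drop] using this
      rw [insert_barrelsGo]
      by_cases hemp_i : item = ""
      · simp only [hemp_i, beq_self_eq_true, if_true]
        by_cases hfire : k = len + 1
        · -- A fills at idx' = i - len; B's window there is all-empty and in range.
          have hidx' : (if len == 0 then i else idx) = i - len := by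
            by_cases h0 : len = 0
            · simp [h0]
            · simp [h0, hidx h0]
          have hrange : i - len + k ≤ inv.length := by omega
          have hall : ((inv.drop (i - len)).take k).all (fun slot => slot == "") = true := by
            rw [List.all_eq_true]
            intro x hx
            obtain ⟨j, hj, hjx⟩ := List.mem_iff_getElem.mp hx
            have hjk : j < k := by
              simp only [List.length_take, List.length_drop] at hj
              omega
            have hjlen : i - len + j < inv.length := by omega
            have : x = inv[i - len + j]'hjlen := by
              rw [← hjx, List.getElem_take, List.getElem_drop]
            rw [this]
            by_cases hjlt : i - len + j < i
            · simp [hemp _ hjlen (by omega) hjlt]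
            · have : i - len + j = i := by omega
              simp only [this]
              rw [← hitem, hemp_i]
              simp
          simp only [show (k == len + 1) = true from by simp [hfire], if_true]
          rw [insert_barrelsAltGo]
          simp only [hrange, hall, dite_true, if_true, hidx']
        · simp only [show (k == len + 1) = false from by simp [hfire], Bool.false_eq_true, if_false]
          have := ih (i+1) (len+1) (if len == 0 then i else idx) hrest' (by omega) (by omega)
            (by omega)
            (by intro _
                by_cases h0 : len = 0
                · rw [if_pos (by simp [h0])]; omega
                · rw [if_neg (by simp [h0]), hidx h0]; omega)
            (by intro j hj hj1 hj2
                by_cases hjlt : j < i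
                · exact hemp j hj (by omega) hjlt
                · have : j = i := by omega
                  subst this
                  rw [← hitem]; exact hemp_i)
          rw [this]
          congr 1
          omega
      · simp only [beq_iff_eq, hemp_i, if_false]
        have hne : inv[i]'hilt ≠ "" := by rw [← hitem]; exact hemp_i
        have := ih (i+1) 0 idx hrest' (by omega) (by omega) hk
          (by intro h; exact absurd rfl h)
          (by intro j hj hj1 hj2; omega)
        rw [this]
        simp only [Nat.sub_zero]
        exact (bGo_skip inv k i len hilt hlk hlen hne).symm

-- ===== VERDICT (by name: the statement is the Claim_ definition above) =====
theorem insert_barrels_spec : Claim_equal_insert_barrels := by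
  intro inventory barrels _
  unfold Spec_insert_barrels insert_barrels insert_barrels_alt
  by_cases hk : barrels.length = 0
  · rw [hk, aGo_zero, insert_barrelsAltGo]
    simp
  · have := main_inv inventory barrels.length (Nat.pos_of_ne_zero hk)
      inventory 0 0 0 (by simp) (by omega) (by omega) (Nat.pos_of_ne_zero hk)
      (by intro h; exact absurd rfl h) (by intro j hj h1 h2; omega)
    simpa using this
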